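-- pv_equiv track=rewrite | github.com/EVC-Purdue/AutonomousKart | src/autonomous_kart/test/test_imu_node.py | _make_burst
-- ===== SOURCE A (Python) =====
-- def _to_be_s16(v: int):
--     """Pack a signed 16-bit int into two big-endian unsigned bytes."""
--     v = int(v) & 0xFFFF
--     return [(v >> 8) & 0xFF, v & 0xFF]
--
-- def _make_burst(accel_raw=(0, 0, 16384), gyro_raw=(0, 0, 0)):
--     """14-byte block: accel(6) + temp(2) + gyro(6), big-endian s16 each."""
--     out = []
--     for a in accel_raw:
--         out += _to_be_s16(a)
--     out += [0, 0]  # temp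
--     for g in gyro_raw:
--         out += _to_be_s16(g)
--     return out
-- ===== SOURCE B (Python) =====
-- def _make_burst(accel_raw=(0, 0, 16384), gyro_raw=(0, 0, 0)):
--     """14-byte block: accel(6) + temp(2) + gyro(6), big-endian s16 each."""
--     vals = tuple(accel_raw) + (0,) + tuple(gyro_raw)
--     n = 0
--     for v in vals:
--         n = (n << 16) + (int(v) & 0xFFFF)
--     out = []
--     for _ in range(2 * len(vals)):
--         out.append(n & 0xFF)
--         n >>= 8
--     out.reverse()
--     return out
-- ===== Notes on version B (the rewrite author's own statement) =====
-- stated objective: alternative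
-- what changed: Instead of emitting a big-endian byte pair per value, B shift-accumulates all seven masked 16-bit words (accel, temp 0, gyro) into one big integer, then peels the 14 bytes off its low end and reverses the list.
import Mathlib
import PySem

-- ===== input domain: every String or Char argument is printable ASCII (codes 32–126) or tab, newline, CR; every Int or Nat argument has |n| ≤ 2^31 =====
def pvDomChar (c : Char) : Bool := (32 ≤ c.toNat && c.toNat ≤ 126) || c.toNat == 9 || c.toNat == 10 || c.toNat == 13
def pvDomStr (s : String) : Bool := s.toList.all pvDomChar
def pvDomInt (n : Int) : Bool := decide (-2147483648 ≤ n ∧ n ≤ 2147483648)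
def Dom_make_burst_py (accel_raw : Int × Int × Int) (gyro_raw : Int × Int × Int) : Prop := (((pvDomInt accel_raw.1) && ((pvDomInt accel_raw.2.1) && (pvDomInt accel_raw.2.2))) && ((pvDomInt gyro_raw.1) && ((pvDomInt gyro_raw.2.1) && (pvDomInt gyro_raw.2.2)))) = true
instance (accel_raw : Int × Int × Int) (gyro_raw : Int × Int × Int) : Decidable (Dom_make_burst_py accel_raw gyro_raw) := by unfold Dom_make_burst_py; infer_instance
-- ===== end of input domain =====

-- B packs all seven masked 16-bit words (accel, temp 0, gyro) into ONE big integer by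
-- shift-accumulate, then peels the 14 bytes off its low end and reverses; objective:
-- alternative (single big-int accumulator instead of per-value byte-pair emission).

-- ===== PORT A =====
-- helper: Python _to_be_s16
def pv_to_be_s16 (v : Int) : List Int :=
  let w := PySem.Int.band v 65535
  [PySem.Int.band (w >>> (8:Nat)) 255, PySem.Int.band w 255]

def make_burst_py (accel_raw : Int × Int × Int) (gyro_raw : Int × Int × Int) : List Int :=
  let out : List Int := []
  let out := [accel_raw.1, accel_raw.2.1, accel_raw.2.2].foldl (fun out a => out ++ pv_to_be_s16 a) out
  let out := out ++ [0, 0]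
  let out := [gyro_raw.1, gyro_raw.2.1, gyro_raw.2.2].foldl (fun out g => out ++ pv_to_be_s16 g) out
  out

-- ===== PORT B =====
def make_burst_py_alt (accel_raw : Int × Int × Int) (gyro_raw : Int × Int × Int) : List Int :=
  -- vals = tuple(accel_raw) + (0,) + tuple(gyro_raw)
  let vals : List Int :=
    ([accel_raw.1, accel_raw.2.1, accel_raw.2.2] ++ [0]) ++ [gyro_raw.1, gyro_raw.2.1, gyro_raw.2.2]
  -- n = 0; for v in vals: n = (n << 16) + (int(v) & 0xFFFF)
  let n : Int := vals.foldl (fun n v => (n <<< (16:Nat)) + PySem.Int.band v 65535) 0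
  -- out = []; for _ in range(2*len(vals)): out.append(n & 0xFF); n >>= 8
  let st := (PySem.List.pyRange 0 (2 * (vals.length : Int)) 1).foldl
      (fun (p : List Int × Int) _ => (p.1 ++ [PySem.Int.band p.2 255], p.2 >>> (8:Nat))) ([], n)
  -- out.reverse(); return out
  st.1.reverse

-- ===== PRECONDITION & SPEC =====
def Spec_make_burst_py (accel_raw : Int × Int × Int) (gyro_raw : Int × Int × Int) (out : List Int) : Prop := out = make_burst_py_alt accel_raw gyro_raw
instance (accel_raw : Int × Int × Int) (gyro_raw : Int × Int × Int) (out : List Int) : Decidable (Spec_make_burst_py accel_raw gyro_raw out) := by unfold Spec_make_burst_py; infer_instance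

-- ===== CLAIM (what is proved, stated in full; the proofs are below) =====
def Claim_equal_make_burst_py : Prop := ∀ (accel_raw : Int × Int × Int) (gyro_raw : Int × Int × Int), Dom_make_burst_py accel_raw gyro_raw → Spec_make_burst_py accel_raw gyro_raw (make_burst_py accel_raw gyro_raw)

-- ===== LEMMAS AND PROOFS =====

-- the masked word of a value, as a natural number
def natMask (v : Int) : Nat := (PySem.Int.band v 65535).toNat

-- masking with 0xFFFF always yields a natural number below 2^16
theorem band_mask_nat (v : Int) : ∃ n : Nat, n ≤ 65535 ∧ PySem.Int.band v 65535 = (n : Int) := by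
  by_cases h : 0 ≤ v
  · refine ⟨v.toNat &&& 65535, by simpa using Nat.and_le_right, ?_⟩
    rw [PySem.Int.band_of_nonneg h (by norm_num)]
    rfl
  · unfold PySem.Int.band
    rw [if_neg (by omega), if_pos (by norm_num)]
    exact ⟨Int.toNat 65535 - (Int.toNat 65535 &&& (-v - 1).toNat), by omega, rfl⟩

theorem natMask_cast (v : Int) : ((natMask v : Nat) : Int) = PySem.Int.band v 65535 := by
  obtain ⟨n, _, he⟩ := band_mask_nat v
  simp [natMask, he]

theorem natMask_lt (v : Int) : natMask v < 65536 := by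
  obtain ⟨n, hn, he⟩ := band_mask_nat v
  simp only [natMask, he]
  omega

-- on a 16-bit word, shift-and-mask for the high byte is floor division by 256
theorem hi_byte (n : Nat) (h : n ≤ 65535) :
    PySem.Int.band ((n : Int) >>> (8:Nat)) 255 = PySem.Int.floordiv (n : Int) 256 := by
  have h1 : (n : Int) >>> (8:Nat) = ((n >>> 8 : Nat) : Int) := by
    simp [Int.shiftRight_eq_div_pow, Nat.shiftRight_eq_div_pow]
  have hd : n >>> 8 = n / 256 := by simp [Nat.shiftRight_eq_div_pow]
  have h4 : (n/256) &&& 255 = n/256 := by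
    have h5 := Nat.and_two_pow_sub_one_eq_mod (n/256) 8
    norm_num at h5
    rw [h5, Nat.mod_eq_of_lt (by omega)]
  have h2 : PySem.Int.band ((n >>> 8 : Nat) : Int) (((255:Nat)):Int) = (((n >>> 8) &&& 255 : Nat) : Int) := PySem.Int.band_natCast _ _
  have h3 : PySem.Int.floordiv (n : Int) (((256:Nat)) : Int) = ((n / 256 : Nat) : Int) := PySem.Int.floordiv_natCast _ _
  rw [h1]
  calc PySem.Int.band ((n >>> 8 : Nat) : Int) (255:Int)
      = (((n >>> 8) &&& 255 : Nat) : Int) := by exact_mod_cast h2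
    _ = ((n / 256 : Nat) : Int) := by rw [hd, h4]
    _ = PySem.Int.floordiv (n : Int) 256 := by exact_mod_cast h3.symm

-- masking the low byte is taking the remainder mod 256
theorem lo_byte (n : Nat) :
    PySem.Int.band (n : Int) 255 = PySem.Int.mod (n : Int) 256 := by
  have h2 : PySem.Int.band ((n:Nat) : Int) (((255:Nat)):Int) = ((n &&& 255 : Nat) : Int) := PySem.Int.band_natCast _ _
  have h3 : PySem.Int.mod (n : Int) (((256:Nat)) : Int) = ((n % 256 : Nat) : Int) := PySem.Int.mod_natCast _ _
  have h5 := Nat.and_two_pow_sub_one_eq_mod n 8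
  norm_num at h5
  calc PySem.Int.band ((n:Nat) : Int) (255:Int) = ((n &&& 255 : Nat) : Int) := by exact_mod_cast h2
    _ = ((n % 256 : Nat) : Int) := by rw [h5]
    _ = PySem.Int.mod (n : Int) 256 := by exact_mod_cast h3.symm

-- A's per-value byte pair, in terms of the masked Nat word
theorem to_be_s16_eq (v : Int) :
    pv_to_be_s16 v = [((natMask v / 256 : Nat) : Int), ((natMask v % 256 : Nat) : Int)] := by
  have hc := natMask_cast v
  have hlt := natMask_lt v
  have hfd : PySem.Int.floordiv ((natMask v : Nat) : Int) 256 = ((natMask v / 256 : Nat) : Int) := by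
    exact_mod_cast PySem.Int.floordiv_natCast (natMask v) 256
  have hmd : PySem.Int.mod ((natMask v : Nat) : Int) 256 = ((natMask v % 256 : Nat) : Int) := by
    exact_mod_cast PySem.Int.mod_natCast (natMask v) 256
  simp only [pv_to_be_s16, ← hc]
  rw [hi_byte (natMask v) (by omega), lo_byte (natMask v), hfd, hmd]

-- Nat-level pack and low-byte extraction
def packN (m : Nat) (ws : List Nat) : Nat := ws.foldl (fun n w => n * 65536 + w) m

def extractN : Nat → Nat → List Nat
  | _, 0 => []
  | n, k + 1 => n % 256 :: extractN (n / 256) k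

-- the reversed low-byte extraction of a packed word list is its big-endian byte stream
theorem extract_pack (ws : List Nat) (h : ∀ w ∈ ws, w < 65536) :
    (extractN (packN 0 ws) (2 * ws.length)).reverse
      = ws.flatMap (fun w => [w / 256, w % 256]) := by
  induction ws using List.reverseRecOn with
  | nil => simp [packN, extractN]
  | append_singleton ws w ih =>
    have hw : w < 65536 := h w (by simp)
    have hws : ∀ u ∈ ws, u < 65536 := fun u hu => h u (by simp [hu])
    have hpack : packN 0 (ws ++ [w]) = packN 0 ws * 65536 + w := by
      simp [packN, List.foldl_append]
    have hlen : 2 * (ws ++ [w]).length = 2 * ws.length + 1 + 1 := by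
      simp; omega
    set M := packN 0 ws with hM
    have e1 : (M * 65536 + w) % 256 = w % 256 := by omega
    have e2 : (M * 65536 + w) / 256 % 256 = w / 256 := by omega
    have e3 : (M * 65536 + w) / 256 / 256 = M := by omega
    rw [hlen, hpack, extractN, extractN, e1, e2, e3]
    simp [ih hws]

-- B's first loop computes the cast of packN over the masked words
theorem pack_fold (vs : List Int) (m : Nat) :
    vs.foldl (fun (n : Int) v => (n <<< (16:Nat)) + PySem.Int.band v 65535) ((m : Nat) : Int)
      = ((packN m (vs.map natMask) : Nat) : Int) := by
  induction vs generalizing m with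
  | nil => simp [packN]
  | cons v vs ih =>
    have h1 : ((m:Int) <<< (16:Nat)) + PySem.Int.band v 65535
        = (((m * 65536 + natMask v : Nat)) : Int) := by
      rw [← natMask_cast v, Int.shiftLeft_eq]
      push_cast; ring
    simp only [List.foldl_cons, h1, ih, List.map_cons]
    rfl

-- B's second loop peels |l| low bytes, appending them onto acc
theorem extract_fold (l : List Int) (m : Nat) (acc : List Int) :
    ((l.foldl (fun (p : List Int × Int) _ => (p.1 ++ [PySem.Int.band p.2 255], p.2 >>> (8:Nat))) (acc, ((m : Nat) : Int))).1)
      = acc ++ (extractN m l.length).map (fun n => ((n : Nat) : Int)) := by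
  induction l generalizing m acc with
  | nil => simp [extractN]
  | cons x l ih =>
    have hb : PySem.Int.band ((m:Nat) : Int) 255 = ((m % 256 : Nat) : Int) := by
      rw [lo_byte]; exact_mod_cast PySem.Int.mod_natCast m 256
    have hsr : ((m:Nat) : Int) >>> (8:Nat) = ((m / 256 : Nat) : Int) := by
      simp [Int.shiftRight_eq_div_pow]
    simp only [List.foldl_cons, hb, hsr, ih, extractN, List.length_cons, List.map_cons]
    simp

-- ===== VERDICT (by name: the statement is the Claim_ definition above) =====
theorem make_burst_py_spec : Claim_equal_make_burst_py := by
  intro a g _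
  unfold Spec_make_burst_py make_burst_py make_burst_py_alt
  -- common form: big-endian byte pairs of the masked words, over the 7-value list
  have hpack := pack_fold ([a.1, a.2.1, a.2.2] ++ [0] ++ [g.1, g.2.1, g.2.2]) 0
  simp only [Nat.cast_zero] at hpack
  simp only [List.cons_append, List.nil_append] at hpack ⊢
  rw [hpack]
  have hrange : PySem.List.pyRange 0 (2 * (([a.1, a.2.1, a.2.2, 0, g.1, g.2.1, g.2.2] : List Int).length : Int)) 1
      = PySem.List.pyRange 0 14 1 := by norm_num
  rw [hrange]
  have h14 : (PySem.List.pyRange 0 14 1).length = 14 := by decide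
  rw [extract_fold]
  rw [h14]
  have hws : (14 : Nat) = 2 * (([a.1, a.2.1, a.2.2, 0, g.1, g.2.1, g.2.2].map natMask).length) := by
    simp
  rw [List.nil_append, ← List.map_reverse, hws,
    extract_pack _ (by intro w hw; simp only [List.mem_map] at hw; obtain ⟨v, _, rfl⟩ := hw; exact natMask_lt v)]
  simp only [List.foldl, to_be_s16_eq, List.map_cons, List.flatMap_cons, List.flatMap_nil,
    List.map_nil, List.nil_append, List.cons_append]
  have h0 : natMask 0 = 0 := by decide
  simp [h0]
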